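-- pv_equiv track=rewrite | github.com/patrickcoyle427/TournamentSoftware | proto_pairings.py | create_points_container
-- ===== SOURCE A (Python) =====
-- def create_points_container(to_pair):
--
--     points_container = {}
--
--     for player in to_pair:
--
--         total_points = player[3]
--
--         if points_container.get(total_points) == None:
--
--             points_container[total_points] = []
--
--         points_container[total_points].append(player)
--
--     return points_container
-- ===== SOURCE B (Python) =====
-- def create_points_container(to_pair):
--     keys = list(dict.fromkeys(p[3] for p in to_pair))
--     return {k: [p for p in to_pair if p[3] == k] for k in keys}
-- ===== Notes on version B (the rewrite author's own statement) =====
-- stated objective: alternative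
-- what changed: B replaces A's single pass that mutates a dict of accumulating lists by a two-phase grouping: collect the distinct point totals in first-occurrence order, then build each group with one filter pass per key.
import Mathlib
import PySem

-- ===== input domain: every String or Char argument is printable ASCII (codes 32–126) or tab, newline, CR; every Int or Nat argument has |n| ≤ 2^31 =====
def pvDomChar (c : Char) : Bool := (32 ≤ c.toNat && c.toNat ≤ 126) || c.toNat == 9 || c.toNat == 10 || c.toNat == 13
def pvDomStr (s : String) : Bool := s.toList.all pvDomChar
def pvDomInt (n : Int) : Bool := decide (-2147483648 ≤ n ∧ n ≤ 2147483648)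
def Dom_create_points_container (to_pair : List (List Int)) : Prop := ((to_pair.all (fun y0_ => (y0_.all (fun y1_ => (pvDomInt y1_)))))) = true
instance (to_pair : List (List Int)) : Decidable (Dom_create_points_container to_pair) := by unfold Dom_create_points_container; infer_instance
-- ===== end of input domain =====

-- B groups players by their point total via two phases (distinct keys in first-occurrence
-- order, then one filter per key) instead of A's single mutating-dict pass; same result,
-- objective: alternative (not faster).

-- player[3]; the 0 default is unreachable under Pre_ (every player has length ≥ 4)
def pvKey (player : List Int) : Int := ((PySem.List.pyGet? player 3).getD 0)

-- ===== PORT A =====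
def create_points_container (to_pair : List (List Int)) : List (Int × List (List Int)) :=
  (to_pair.foldl (fun points_container player =>
      let total_points := pvKey player
      let points_container :=
        if points_container.get? total_points == none then
          points_container.insert total_points ([] : List (List Int))
        else points_container
      points_container.modify total_points [] (fun l => l ++ [player]))
    PySem.Dict.empty).items

-- ===== PORT B =====
def create_points_container_alt (to_pair : List (List Int)) : List (Int × List (List Int)) :=
  let keys := PySem.List.dedup (to_pair.map pvKey)   -- list(dict.fromkeys(...))
  (keys.foldl (fun d k => d.insert k (to_pair.filter (fun p => pvKey p == k)))
    PySem.Dict.empty).items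

-- ===== PRECONDITION & SPEC =====
-- Pre_ excludes exactly the inputs where A raises IndexError: a player list shorter than 4.
def Pre_create_points_container (to_pair : List (List Int)) : Prop :=
  ∀ p ∈ to_pair, 4 ≤ p.length
instance (to_pair : List (List Int)) : Decidable (Pre_create_points_container to_pair) := by unfold Pre_create_points_container; infer_instance

def pvWitness_create_points_container : List (List Int) := [[1, 2, 3, 4], [5, 6, 7, 4], [0, 0, 0, 2]]

def Spec_create_points_container (to_pair : List (List Int)) (out : List (Int × List (List Int))) : Prop := out = create_points_container_alt to_pair
instance (to_pair : List (List Int)) (out : List (Int × List (List Int))) : Decidable (Spec_create_points_container to_pair out) := by unfold Spec_create_points_container; infer_instance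

-- ===== CLAIM (what is proved, stated in full; the proofs are below) =====
def Claim_equal_create_points_container : Prop := ∀ (to_pair : List (List Int)), Dom_create_points_container to_pair → Pre_create_points_container to_pair → Spec_create_points_container to_pair (create_points_container to_pair)

-- ===== LEMMAS AND PROOFS =====

-- A's loop step, named for the lemmas below
def pvStepA (d : PySem.Dict Int (List (List Int))) (player : List Int) : PySem.Dict Int (List (List Int)) :=
  let total_points := pvKey player
  let d' := if d.get? total_points == none then d.insert total_points ([] : List (List Int)) else d
  d'.modify total_points [] (fun l => l ++ [player])

theorem pv_getD_step (d : PySem.Dict Int (List (List Int))) (p : List Int) (c : Int) :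
    (pvStepA d p).getD c [] = if c = pvKey p then d.getD c [] ++ [p] else d.getD c [] := by
  unfold pvStepA
  rcases hv : d.get? (pvKey p) with _ | v
  · simp only [hv, BEq.rfl, if_true]
    by_cases hc : c = pvKey p
    · subst hc
      rw [PySem.Dict.getD_modify_self, PySem.Dict.getD_insert_self,
        PySem.Dict.getD_of_get?_eq_none d _ hv]
      simp
    · rw [PySem.Dict.getD_modify_of_ne _ _ _ hc, PySem.Dict.getD_insert_of_ne _ _ _ hc,
        if_neg hc]
  · have hb : (some v == (none : Option (List (List Int)))) = false := rfl
    simp only [hv, hb, Bool.false_eq_true, if_false]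
    by_cases hc : c = pvKey p
    · subst hc
      rw [PySem.Dict.getD_modify_self, if_pos rfl]
    · rw [PySem.Dict.getD_modify_of_ne _ _ _ hc, if_neg hc]

theorem pv_keys_step (d : PySem.Dict Int (List (List Int))) (p : List Int) :
    (pvStepA d p).keys = PySem.Set.add d.keys (pvKey p) := by
  unfold pvStepA
  rcases hv : d.get? (pvKey p) with _ | v
  · have hc : d.contains (pvKey p) = false := by
      rw [PySem.Dict.contains_eq_isSome_get?, hv]; rfl
    have hnm : pvKey p ∉ d.keys := fun hm =>
      by simp [(PySem.Dict.contains_iff_mem_keys d (pvKey p)).2 hm] at hc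
    have hc' : (d.insert (pvKey p) ([] : List (List Int))).contains (pvKey p) = true :=
      PySem.Dict.contains_insert_self _ _ _
    simp only [hv, BEq.rfl, if_true]
    rw [PySem.Dict.keys_modify, PySem.Dict.keys_insert_of_contains _ _ hc',
      PySem.Dict.keys_insert_of_not_contains _ _ hc, PySem.Set.add_of_not_mem hnm]
  · have hc : d.contains (pvKey p) = true := by
      rw [PySem.Dict.contains_eq_isSome_get?, hv]; rfl
    have hm : pvKey p ∈ d.keys := (PySem.Dict.contains_iff_mem_keys d (pvKey p)).1 hc
    have hb : (some v == (none : Option (List (List Int)))) = false := rfl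
    simp only [hv, hb, Bool.false_eq_true, if_false]
    rw [PySem.Dict.keys_modify, PySem.Dict.keys_insert_of_contains _ _ hc,
      PySem.Set.add_of_mem hm]

theorem pv_getD_loop (l : List (List Int)) (d : PySem.Dict Int (List (List Int))) (c : Int) :
    (l.foldl pvStepA d).getD c [] = d.getD c [] ++ l.filter (fun p => pvKey p == c) := by
  induction l generalizing d with
  | nil => simp
  | cons p l ih =>
      simp only [List.foldl_cons, List.filter_cons, ih, pv_getD_step]
      by_cases h : pvKey p = c
      · simp [h]
      · simp [h]; exact fun hc => h hc.symm

theorem pv_keys_loop (l : List (List Int)) (d : PySem.Dict Int (List (List Int))) :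
    (l.foldl pvStepA d).keys = PySem.Set.update d.keys (l.map pvKey) := by
  induction l generalizing d with
  | nil => simp [PySem.Set.update]
  | cons p l ih =>
      simp only [List.foldl_cons, List.map_cons, PySem.Set.update_cons, ih, pv_keys_step]

theorem pv_A_items (to_pair : List (List Int)) :
    create_points_container to_pair
      = (PySem.Set.ofList (to_pair.map pvKey)).map
          (fun k => (k, to_pair.filter (fun p => pvKey p == k))) := by
  have hA : create_points_container to_pair = (to_pair.foldl pvStepA PySem.Dict.empty).items := rfl
  have hkeys : (to_pair.foldl pvStepA PySem.Dict.empty).keys = PySem.Set.ofList (to_pair.map pvKey) := by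
    rw [pv_keys_loop, PySem.Dict.keys_empty, PySem.Set.update_nil_left]
  have hnd : (to_pair.foldl pvStepA PySem.Dict.empty).keys.Nodup := by
    rw [hkeys]; exact PySem.Set.nodup_ofList _
  rw [hA, PySem.Dict.items_eq_map_keys _ hnd ([] : List (List Int)), hkeys]
  apply List.map_congr_left
  intro k _
  rw [pv_getD_loop, PySem.Dict.getD_empty]
  simp

theorem pv_B_items (to_pair : List (List Int)) :
    create_points_container_alt to_pair
      = (PySem.Set.ofList (to_pair.map pvKey)).map
          (fun k => (k, to_pair.filter (fun p => pvKey p == k))) := by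
  unfold create_points_container_alt
  simp only [PySem.List.dedup_eq_ofList]
  rw [PySem.Dict.items_foldl_insert_fresh _ (fun a => a)
      (fun k => to_pair.filter (fun p => pvKey p == k)) PySem.Dict.empty
      (fun a _ => PySem.Dict.contains_empty a)
      (by simp)]
  rfl

-- ===== VERDICT (by name: the statement is the Claim_ definition above) =====
theorem create_points_container_spec : Claim_equal_create_points_container := by
  intro to_pair _ _
  unfold Spec_create_points_container
  rw [pv_A_items, pv_B_items]
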